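-- pv_equiv track=rewrite | github.com/csj8566/programmers_codingtest | 프로그래머스/2/132265. 롤케이크 자르기/롤케이크 자르기.py | solution
-- ===== SOURCE A (Python) =====
-- from collections import Counter
--
-- def solution(topping):
--     answer = 0
--     n = len(topping) # 8
--
--     right_counter = dict(Counter(topping)) # 쪼개기 전 전체 topping 을 Counter 객체로 만든 걸로 초기화
--     left_counter = {}
--
--     unique_right = len(right_counter) # 4
--     unique_left = 0
--
--     for i in topping:
--         if i not in left_counter: # 왼쪽에 새로운 토핑 등장
--             left_counter[i] = 1
--             unique_left += 1
--             right_counter[i] -= 1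
--
--             if right_counter[i] == 0: # 왼쪽에 토핑 할당하느라 오른쪽에 더이상 그 토핑 존재하지 않는다면
--                 unique_right -= 1
--
--             if unique_left == unique_right: # 정답이 되는 경우의 수라면
--                 answer += 1
--
--         else: # 왼쪽에게 있어서 새로운 토핑은 아니지만
--             left_counter[i] += 1
--             right_counter[i] -= 1
--
--             if right_counter[i] == 0:
--                 unique_right -= 1
--
--             if unique_left == unique_right:
--                 answer += 1
--
--
--     return answer
-- ===== SOURCE B (Python) =====
-- def solution(topping):
--     # backward pass: right[i] = number of distinct toppings in topping[i:], right[n] = 0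
--     right = []
--     seen = set()
--     for x in reversed(topping):
--         seen.add(x)
--         right.append(len(seen))
--     right.reverse()
--     right.append(0)
--     # forward pass: left set of seen toppings, compare with precomputed suffix counts
--     left = set()
--     answer = 0
--     for x, r in zip(topping, right[1:]):
--         left.add(x)
--         if len(left) == r:
--             answer += 1
--     return answer
-- ===== Notes on version B (the rewrite author's own statement) =====
-- stated objective: alternative
-- what changed: Replaces A's single pass that mutates a full right-side Counter (per-element dict decrements and zero checks) by a backward pass precomputing a suffix-distinct-count table with a running set, then a forward pass keeping only a left set and comparing its size with the table.
import Mathlib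
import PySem

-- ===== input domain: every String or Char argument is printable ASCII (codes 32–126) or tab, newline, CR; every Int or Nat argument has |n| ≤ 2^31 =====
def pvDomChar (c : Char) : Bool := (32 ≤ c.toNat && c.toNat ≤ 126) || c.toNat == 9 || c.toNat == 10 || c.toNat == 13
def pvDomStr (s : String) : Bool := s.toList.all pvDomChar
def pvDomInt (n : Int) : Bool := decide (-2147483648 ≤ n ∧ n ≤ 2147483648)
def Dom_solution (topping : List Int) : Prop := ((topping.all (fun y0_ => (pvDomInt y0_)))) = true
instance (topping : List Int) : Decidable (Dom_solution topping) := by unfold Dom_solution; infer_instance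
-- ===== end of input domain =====

-- B replaces A's single pass mutating a full right-side Counter by a backward pass precomputing
-- a suffix-distinct-count table plus a forward pass with only a left set (different decomposition; same O(n), measured constant-factor faster).


-- ===== PORT A =====
-- loop body of A's 'for i in topping'; state = (answer, left_counter, right_counter, unique_left, unique_right)
-- 'right_counter[i] -= 1' is ported as 'modify i 0 (· - 1)': exact, since i ∈ topping is always a key of Counter(topping);
-- likewise 'left_counter[i] += 1' in the else branch, where i is already a key of left_counter.
def aStep (st : Int × PySem.Dict Int Int × PySem.Dict Int Int × Int × Int) (i : Int) :
    Int × PySem.Dict Int Int × PySem.Dict Int Int × Int × Int :=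
  let (answer, left, right, uL, uR) := st
  if !(left.contains i) then  -- i not in left_counter
    let left := left.insert i 1
    let uL := uL + 1
    let right := right.modify i 0 (· - 1)
    let uR := if right.getD i 0 = 0 then uR - 1 else uR
    let answer := if uL = uR then answer + 1 else answer
    (answer, left, right, uL, uR)
  else
    let left := left.modify i 0 (· + 1)
    let right := right.modify i 0 (· - 1)
    let uR := if right.getD i 0 = 0 then uR - 1 else uR
    let answer := if uL = uR then answer + 1 else answer
    (answer, left, right, uL, uR)

def solution (topping : List Int) : Int :=
  let _n : Int := (topping.length : Int)          -- n = len(topping) (unused by A afterwards)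
  let rightCounter : PySem.Dict Int Int := PySem.Dict.counter topping
  let st := topping.foldl aStep
    (0, PySem.Dict.empty, rightCounter, 0, ((rightCounter.size : Nat) : Int))
  st.1

-- ===== PORT B =====
-- backward pass: seen.add(x); right.append(len(seen))
def bBackStep (st : PySem.Set Int × List Int) (x : Int) : PySem.Set Int × List Int :=
  let seen := PySem.Set.add st.1 x
  (seen, st.2 ++ [PySem.Set.len seen])

-- forward pass over zip(topping, right[1:]): left.add(x); compare len(left) with r
def bFwdStep (st : PySem.Set Int × Int) (p : Int × Int) : PySem.Set Int × Int :=
  let left := PySem.Set.add st.1 p.1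
  (left, if PySem.Set.len left = p.2 then st.2 + 1 else st.2)

def solution_alt (topping : List Int) : Int :=
  let bp := topping.reverse.foldl bBackStep (PySem.Set.empty, [])
  let right := bp.2.reverse ++ [(0 : Int)]
  let fp := (topping.zip (PySem.List.slice right (some 1) none)).foldl bFwdStep (PySem.Set.empty, 0)
  fp.2

-- ===== PRECONDITION & SPEC =====
def Spec_solution (topping : List Int) (out : Int) : Prop := out = solution_alt topping
instance (topping : List Int) (out : Int) : Decidable (Spec_solution topping out) := by unfold Spec_solution; infer_instance

-- ===== CLAIM (what is proved, stated in full; the proofs are below) =====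
def Claim_equal_solution : Prop := ∀ (topping : List Int), Dom_solution topping → Spec_solution topping (solution topping)

-- ===== LEMMAS AND PROOFS =====

-- number of distinct elements of s, as A's unique_right / B's table entries count it
def dcount (s : List Int) : Int := ((PySem.Set.ofList s).length : Int)

-- reference function: both ports equal 'refCount ∅ topping'
def refCount : PySem.Set Int → List Int → Int
  | _, [] => 0
  | seen, x :: rest =>
      (if ((PySem.Set.add seen x).length : Int) = dcount rest then 1 else 0) +
        refCount (PySem.Set.add seen x) rest

-- two nodup lists with the same members have the same length
lemma set_len_eq {s t : List Int} (hs : s.Nodup) (ht : t.Nodup)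
    (h : ∀ y, y ∈ s ↔ y ∈ t) : s.length = t.length := by
  exact ((List.perm_ext_iff_of_nodup hs ht).mpr h).length_eq

lemma length_discard (s : PySem.Set Int) (x : Int) (hs : s.Nodup) :
    (PySem.Set.discard s x).length = if x ∈ s then s.length - 1 else s.length := by
  show (List.filter (fun y => !(y == x)) s).length = _
  have key : ∀ (l : List Int),
      (List.filter (fun y => !(y == x)) l).length + l.count x = l.length := by
    intro l
    induction l with
    | nil => simp
    | cons a t ih =>
      by_cases hax : a = x
      · subst hax
        simp [List.filter]
        omega
      · have hb : (a == x) = false := beq_eq_false_iff_ne.mpr hax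
        simp [List.filter, hb, hax]
        omega
  by_cases hm : x ∈ s
  · have h1 := key s
    rw [List.count_eq_one_of_mem hs hm] at h1
    simp only [hm, if_true]
    omega
  · have h1 := key s
    rw [List.count_eq_zero_of_not_mem hm] at h1
    simp only [hm, if_false]
    omega

lemma dcount_cons (x : Int) (rest : List Int) :
    dcount (x :: rest) = dcount rest + (if x ∈ rest then 0 else 1) := by
  unfold dcount
  rw [PySem.Set.ofList_cons, List.length_cons,
    length_discard _ _ (PySem.Set.nodup_ofList rest)]
  by_cases h : x ∈ rest
  · have hm : x ∈ PySem.Set.ofList rest := (PySem.Set.mem_ofList _ _).mpr h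
    have : 0 < (PySem.Set.ofList rest).length := List.length_pos_of_mem hm
    simp [h, hm]
    omega
  · have hm : x ∉ PySem.Set.ofList rest := fun c => h ((PySem.Set.mem_ofList _ _).mp c)
    simp [h, hm]

lemma add_length (seen : PySem.Set Int) (x : Int) :
    ((PySem.Set.add seen x).length : Int) =
      (seen.length : Int) + (if x ∈ seen then 0 else 1) := by
  rw [PySem.Set.add_eq_ite]
  by_cases hx : x ∈ seen <;> simp [hx]

-- A's loop invariant
lemma A_loop (s : List Int) (ans uL uR : Int) (left right : PySem.Dict Int Int)
    (seen : PySem.Set Int) (hnd : seen.Nodup)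
    (hLc : ∀ i, left.contains i = true ↔ i ∈ seen)
    (huL : uL = (seen.length : Int))
    (hR : ∀ i ∈ s, right.getD i 0 = (s.count i : Int))
    (huR : uR = dcount s) :
    (s.foldl aStep (ans, left, right, uL, uR)).1 = ans + refCount seen s := by
  induction s generalizing ans uL uR left right seen with
  | nil => simp [refCount]
  | cons x rest ih =>
    -- the decremented right counter tracks the counts of the remaining suffix
    have hRx : (right.modify x 0 (· - 1)).getD x 0 = (rest.count x : Int) := by
      rw [PySem.Dict.getD_modify, if_pos rfl, hR x (List.mem_cons_self),
        List.count_cons_self]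
      push_cast
      ring
    have hR' : ∀ i ∈ rest, (right.modify x 0 (· - 1)).getD i 0 = (rest.count i : Int) := by
      intro i hi
      by_cases hix : i = x
      · subst hix
        exact hRx
      · rw [PySem.Dict.getD_modify, if_neg hix, hR i (List.mem_cons_of_mem _ hi)]
        have hxi : ¬ x = i := fun h => hix h.symm
        have hcc : List.count i (x :: rest) = List.count i rest := by
          simp [hxi]
        rw [hcc]
    -- the updated unique_right is the distinct count of the remaining suffix
    have hUR : (if (right.modify x 0 (· - 1)).getD x 0 = 0 then uR - 1 else uR)
        = dcount rest := by
      rw [hRx, huR, dcount_cons]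
      by_cases hxr : x ∈ rest
      · have h0 : (rest.count x : Int) ≠ 0 := by
          have := List.count_pos_iff.mpr hxr
          omega
        simp only [if_neg h0, if_pos hxr]
        ring
      · have h0 : (rest.count x : Int) = 0 := by
          rw [List.count_eq_zero_of_not_mem hxr]
          rfl
        simp only [if_pos h0, if_neg hxr]
        ring
    by_cases hx : x ∈ seen
    · -- else branch of A: x already on the left
      have hc : left.contains x = true := (hLc x).mpr hx
      have hadd : PySem.Set.add seen x = seen := PySem.Set.add_of_mem hx
      simp only [List.foldl_cons, aStep, hc, Bool.not_true, Bool.false_eq_true, if_false]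
      rw [ih _ _ _ _ _ (PySem.Set.add seen x)
        (by rw [hadd]; exact hnd)
        (by intro i
            rw [PySem.Dict.contains_modify, hadd]
            constructor
            · intro h
              rcases Bool.or_eq_true_iff.mp h with h | h
              · exact (beq_iff_eq.mp h) ▸ hx
              · exact (hLc i).mp h
            · intro h
              exact Bool.or_eq_true_iff.mpr (Or.inr ((hLc i).mpr h)))
        (by rw [hadd]; exact huL)
        hR' hUR]
      rw [refCount, hadd, ← huL, hUR]
      by_cases hcond : uL = dcount rest <;> simp [hcond] <;> ring
    · -- then branch of A: x is new on the left
      have hc : left.contains x = false := by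
        cases hcl : left.contains x
        · rfl
        · exact absurd ((hLc x).mp hcl) hx
      have haddlen : ((PySem.Set.add seen x).length : Int) = uL + 1 := by
        rw [add_length seen x, if_neg hx, huL]
      simp only [List.foldl_cons, aStep, hc, Bool.not_false, if_true]
      rw [ih _ _ _ _ _ (PySem.Set.add seen x)
        (PySem.Set.nodup_add seen x hnd)
        (by intro i
            rw [PySem.Dict.contains_insert, PySem.Set.mem_add]
            constructor
            · intro h
              rcases Bool.or_eq_true_iff.mp h with h | h
              · exact Or.inr (beq_iff_eq.mp h)
              · exact Or.inl ((hLc i).mp h)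
            · intro h
              rcases h with h | h
              · exact Bool.or_eq_true_iff.mpr (Or.inr ((hLc i).mpr h))
              · exact Bool.or_eq_true_iff.mpr (Or.inl (beq_iff_eq.mpr h)))
        haddlen.symm
        hR' hUR]
      rw [refCount, haddlen, hUR]
      by_cases hcond : uL + 1 = dcount rest <;> simp [hcond] <;> ring

-- suffix-distinct table, as a left recursion
def dList : List Int → List Int
  | [] => []
  | x :: r => dcount (x :: r) :: dList r

-- what topping.zip right[1:] folds over
def dTail : List Int → List Int
  | [] => []
  | _ :: r => dList r ++ [(0 : Int)]

lemma drop_one_dList (t : List Int) : (dList t ++ [(0 : Int)]).tail = dTail t := by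
  cases t <;> rfl

lemma dTail_cons (x : Int) (r : List Int) : dTail (x :: r) = dcount r :: dTail r := by
  cases r <;> rfl

-- B's backward pass produces (a set of t's elements, the suffix-distinct list reversed)
lemma B_back (t : List Int) :
    (t.reverse.foldl bBackStep (PySem.Set.empty, [])).1.Nodup ∧
    (∀ y, y ∈ (t.reverse.foldl bBackStep (PySem.Set.empty, [])).1 ↔ y ∈ t) ∧
    (t.reverse.foldl bBackStep (PySem.Set.empty, [])).2.reverse = dList t := by
  induction t with
  | nil => simp [PySem.Set.empty, dList]
  | cons x r ih =>
    obtain ⟨ihnd, ihmem, ihrev⟩ := ih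
    rw [List.reverse_cons, List.foldl_append]
    refine ⟨PySem.Set.nodup_add _ _ ihnd, ?_, ?_⟩
    · intro y
      rw [show (List.foldl bBackStep (List.foldl bBackStep (PySem.Set.empty, []) r.reverse) [x]).1
            = PySem.Set.add (List.foldl bBackStep (PySem.Set.empty, []) r.reverse).1 x from rfl,
        PySem.Set.mem_add]
      rw [ihmem y, List.mem_cons]
      tauto
    · rw [show (List.foldl bBackStep (List.foldl bBackStep (PySem.Set.empty, []) r.reverse) [x])
            = (PySem.Set.add (List.foldl bBackStep (PySem.Set.empty, []) r.reverse).1 x,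
               (List.foldl bBackStep (PySem.Set.empty, []) r.reverse).2
                 ++ [PySem.Set.len (PySem.Set.add (List.foldl bBackStep (PySem.Set.empty, []) r.reverse).1 x)]) from rfl]
      rw [List.reverse_append, List.reverse_singleton, List.singleton_append, ihrev, dList]
      congr 1
      show ((PySem.Set.add (List.foldl bBackStep (PySem.Set.empty, []) r.reverse).1 x).length : Int)
        = dcount (x :: r)
      unfold dcount
      congr 1
      apply set_len_eq
      · exact PySem.Set.nodup_add _ _ ihnd
      · exact PySem.Set.nodup_ofList _
      · intro y
        rw [PySem.Set.mem_add, PySem.Set.mem_ofList, ihmem y, List.mem_cons]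
        tauto

-- B's forward pass accumulates refCount
lemma B_fwd (s : List Int) (seen : PySem.Set Int) (ans : Int) (hnd : seen.Nodup) :
    ((s.zip (dTail s)).foldl bFwdStep (seen, ans)).2 = ans + refCount seen s := by
  induction s generalizing seen ans with
  | nil => simp [refCount]
  | cons x r ih =>
    rw [dTail_cons, List.zip_cons_cons, List.foldl_cons]
    rw [show bFwdStep (seen, ans) (x, dcount r)
          = (PySem.Set.add seen x,
             if PySem.Set.len (PySem.Set.add seen x) = dcount r then ans + 1 else ans) from rfl]
    rw [ih _ _ (PySem.Set.nodup_add seen x hnd), refCount]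
    show _ = ans + ((if ((PySem.Set.add seen x).length : Int) = dcount r then 1 else 0) + _)
    rw [show PySem.Set.len (PySem.Set.add seen x) = ((PySem.Set.add seen x).length : Int) from rfl]
    by_cases hcond : ((PySem.Set.add seen x).length : Int) = dcount r <;> simp [hcond] <;> ring

lemma solution_eq_refCount (t : List Int) : solution t = refCount PySem.Set.empty t := by
  show (t.foldl aStep
    (0, PySem.Dict.empty, PySem.Dict.counter t, 0,
      (((PySem.Dict.counter t).size : Nat) : Int))).1 = refCount PySem.Set.empty t
  rw [A_loop t 0 0 _ PySem.Dict.empty (PySem.Dict.counter t) PySem.Set.empty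
    List.nodup_nil
    (by intro i; simp [PySem.Dict.contains_empty, PySem.Set.empty])
    (by simp [PySem.Set.empty])
    (by intro i _; exact PySem.Dict.getD_counter t i)
    (by show (((PySem.Dict.counter t).items.length : Nat) : Int) = dcount t
        rw [PySem.Dict.items_counter, List.length_map]
        rfl)]
  ring

lemma solution_alt_eq_refCount (t : List Int) : solution_alt t = refCount PySem.Set.empty t := by
  show ((t.zip (PySem.List.slice
      ((t.reverse.foldl bBackStep (PySem.Set.empty, [])).2.reverse ++ [(0 : Int)])
      (some 1) none)).foldl bFwdStep (PySem.Set.empty, 0)).2 = refCount PySem.Set.empty t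
  rw [(B_back t).2.2, PySem.List.slice_from_one, drop_one_dList,
    B_fwd t PySem.Set.empty 0 List.nodup_nil]
  ring

-- ===== VERDICT (by name: the statement is the Claim_ definition above) =====
theorem solution_spec : Claim_equal_solution := by
  intro t _
  unfold Spec_solution
  rw [solution_eq_refCount, solution_alt_eq_refCount]
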